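-- pv_equiv track=rewrite | github.com/cirosantilli/project-euler-solutions | solvers/732.py | generate_trolls
-- ===== SOURCE A (Python) =====
-- from typing import List, Tuple
--
-- MOD = 1_000_000_007
--
-- def generate_trolls(n: int) -> List[Tuple[int, int, int]]:
--     """Return list of (h, l, q) for trolls 0..n-1."""
--     # Need r_0..r_{3n-1}
--     total_r = 3 * n
--     r = [0] * total_r
--
--     p = 1  # 5^0 mod MOD
--     for i in range(total_r):
--         r[i] = (p % 101) + 50
--         p = (p * 5) % MOD
--
--     trolls = []
--     for k in range(n):
--         h = r[3 * k]
--         l = r[3 * k + 1]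
--         q = r[3 * k + 2]
--         trolls.append((h, l, q))
--     return trolls
-- ===== SOURCE B (Python) =====
-- from typing import List, Tuple
--
-- MOD = 1_000_000_007
--
-- def generate_trolls(n: int) -> List[Tuple[int, int, int]]:
--     """Return list of (h, l, q) for trolls 0..n-1."""
--     def r(i: int) -> int:
--         return pow(5, i, MOD) % 101 + 50
--     return [(r(3 * k), r(3 * k + 1), r(3 * k + 2)) for k in range(n)]
-- ===== Notes on version B (the rewrite author's own statement) =====
-- stated objective: alternative
-- what changed: Replaced A's sequential recurrence (a running power repeatedly multiplied by five mod MOD, filling a full length-3n table that is then regrouped into triples) with a random-access closed form: each entry is computed independently by modular exponentiation pow(five, i, MOD), with no running state and no intermediate array; this trades A's linear scan for an O(n log n) but stateless per-troll computation.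
import Mathlib
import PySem

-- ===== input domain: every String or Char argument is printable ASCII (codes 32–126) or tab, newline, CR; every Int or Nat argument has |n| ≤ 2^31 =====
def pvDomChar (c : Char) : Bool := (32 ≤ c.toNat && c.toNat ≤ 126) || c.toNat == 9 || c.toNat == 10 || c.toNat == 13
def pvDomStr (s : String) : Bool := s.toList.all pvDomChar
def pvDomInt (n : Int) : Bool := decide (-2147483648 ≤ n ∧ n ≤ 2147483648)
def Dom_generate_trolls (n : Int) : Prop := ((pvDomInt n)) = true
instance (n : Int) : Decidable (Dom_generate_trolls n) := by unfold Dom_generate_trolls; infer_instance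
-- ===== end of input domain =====

-- B replaces A's sequential recurrence (running power filling a length-3n table, then
-- regrouped into triples) with a random-access closed form: each entry is
-- pow(5, i, MOD) % 101 + 50, computed independently. Same results, no running state.

-- ===== PORT A =====
-- body of A's first loop: r[i] = (p % 101) + 50; p = (p * 5) % MOD
def pvStepA1 (st : List Int × Int) (i : Int) : List Int × Int :=
  (PySem.List.pySetD st.1 i (PySem.Int.mod st.2 101 + 50),
   PySem.Int.mod (st.2 * 5) 1000000007)

-- body of A's second loop: h = r[3k]; l = r[3k+1]; q = r[3k+2]; trolls.append(...)
-- (indices are always in range, so pyGetD's default is never used)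
def pvStepA2 (r : List Int) (trolls : List (Int × Int × Int)) (k : Int) : List (Int × Int × Int) :=
  let h := PySem.List.pyGetD r (3 * k) 0
  let l := PySem.List.pyGetD r (3 * k + 1) 0
  let q := PySem.List.pyGetD r (3 * k + 2) 0
  trolls ++ [(h, l, q)]

def generate_trolls (n : Int) : List (Int × Int × Int) :=
  let total_r : Int := 3 * n
  let r0 : List Int := List.replicate total_r.toNat 0   -- [0] * total_r
  let st := (PySem.List.pyRange 0 total_r 1).foldl pvStepA1 (r0, 1)
  let r := st.1
  (PySem.List.pyRange 0 n 1).foldl (pvStepA2 r) []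

-- ===== PORT B =====
-- Source B's helper r(i) = pow(5, i, MOD) % 101 + 50. The exponent i is always ≥ 0 here,
-- so pow(5, i, MOD) = 5^i % MOD with both arguments nonnegative: Lean's % is exact there.
def pvR (i : Int) : Int :=
  PySem.Int.mod ((5 : Int) ^ i.toNat % 1000000007) 101 + 50

-- Source B's list comprehension over range(n)
def generate_trolls_alt (n : Int) : List (Int × Int × Int) :=
  (PySem.List.pyRange 0 n 1).map
    (fun k => (pvR (3 * k), pvR (3 * k + 1), pvR (3 * k + 2)))

-- ===== PRECONDITION & SPEC =====
def Spec_generate_trolls (n : Int) (out : List (Int × Int × Int)) : Prop := out = generate_trolls_alt n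
instance (n : Int) (out : List (Int × Int × Int)) : Decidable (Spec_generate_trolls n out) := by unfold Spec_generate_trolls; infer_instance

-- ===== CLAIM (what is proved, stated in full; the proofs are below) =====
def Claim_equal_generate_trolls : Prop := ∀ (n : Int), Dom_generate_trolls n → Spec_generate_trolls n (generate_trolls n)

-- ===== LEMMAS AND PROOFS =====

-- 5^i mod MOD (the value of p before iteration i of A's first loop)
def pvPw (i : Nat) : Int := (5 : Int) ^ i % 1000000007

-- the i-th table entry r[i]
def pvF (i : Nat) : Int := PySem.Int.mod (pvPw i) 101 + 50

-- the k-th troll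
def pvG (k : Nat) : Int × Int × Int := (pvF (3 * k), pvF (3 * k + 1), pvF (3 * k + 2))

-- the common specification both ports are reduced to
def pvSpec (m : Nat) : List (Int × Int × Int) := (List.range m).map pvG

lemma pvPw_step' (i : Nat) : pvPw i * 5 % 1000000007 = pvPw (i + 1) := by
  unfold pvPw
  rw [pow_succ]
  conv_rhs => rw [Int.mul_emod]
  norm_num [Int.emod_emod_of_dvd]

lemma pv_range_shift (a m : Nat) :
    pvG a :: (List.range m).map (fun j => pvG (a + 1 + j))
      = (List.range (m + 1)).map (fun j => pvG (a + j)) := by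
  rw [List.range_succ_eq_map, List.map_cons, List.map_map]
  simp only [Nat.add_zero]
  congr 1
  apply List.map_congr_left
  intro j _
  simp only [Function.comp_apply]
  congr 1
  omega

lemma pv_foldA1 (m : Nat) (pad : List Int) :
    (PySem.List.pyRange 0 (m : Int) 1).foldl pvStepA1 (List.replicate m 0 ++ pad, 1)
      = ((List.range m).map pvF ++ pad, pvPw m) := by
  induction m generalizing pad with
  | zero =>
      rw [Nat.cast_zero, PySem.List.pyRange_one_eq_nil le_rfl]
      simp [pvPw]
  | succ m ih =>
      rw [show ((m + 1 : Nat) : Int) = (m : Int) + 1 by push_cast; ring,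
          PySem.List.pyRange_one_succ_right (by exact_mod_cast Nat.zero_le m),
          List.foldl_append]
      have hrep : List.replicate (m + 1) (0 : Int) ++ pad
          = List.replicate m 0 ++ (0 :: pad) := by
        rw [List.replicate_succ']; simp
      rw [hrep, ih (0 :: pad)]
      unfold pvStepA1
      simp only [List.foldl_cons, List.foldl_nil]
      simp only [PySem.List.pySetD_natCast]
      rw [List.set_append_right _ _ (by simp)]
      simp [pvF, List.range_succ, pvPw_step']

lemma pv_foldA2 (fuel : Nat) (r : List Int) (nn a : Nat) (acc : List (Int × Int × Int))
    (hr : r = (List.range (3 * nn)).map pvF) (ha : a + fuel = nn) :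
    (PySem.List.pyRange (a : Int) (nn : Int) 1).foldl (pvStepA2 r) acc
      = acc ++ (List.range fuel).map (fun j => pvG (a + j)) := by
  induction fuel generalizing a acc with
  | zero =>
      have h : (nn : Int) ≤ (a : Int) := by omega
      simp [PySem.List.pyRange_one_eq_nil h]
  | succ fuel ih =>
      have hlt : (a : Int) < (nn : Int) := by exact_mod_cast (by omega : a < nn)
      rw [PySem.List.pyRange_one_cons hlt]
      simp only [List.foldl_cons]
      have hstep : pvStepA2 r acc (a : Int) = acc ++ [pvG a] := by
        unfold pvStepA2
        rw [show (3 * (a : Int) + 2) = ((3 * a + 2 : Nat) : Int) by push_cast; ring,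
            show (3 * (a : Int) + 1) = ((3 * a + 1 : Nat) : Int) by push_cast; ring,
            show (3 * (a : Int)) = ((3 * a : Nat) : Int) by push_cast; ring]
        simp only [PySem.List.pyGetD_natCast, hr]
        rw [List.getD_eq_getElem _ _ (by simp; omega),
            List.getD_eq_getElem _ _ (by simp; omega),
            List.getD_eq_getElem _ _ (by simp; omega)]
        simp [pvG]
      rw [hstep,
          show ((a : Int) + 1) = ((a + 1 : Nat) : Int) by push_cast; ring,
          ih (a + 1) _ (by omega)]
      rw [List.append_assoc, List.singleton_append, pv_range_shift]

lemma pv_A_eq_spec (n : Int) : generate_trolls n = pvSpec n.toNat := by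
  by_cases hn : n < 0
  · have h1 : PySem.List.pyRange 0 n 1 = [] := PySem.List.pyRange_one_eq_nil (by omega)
    have h2 : n.toNat = 0 := by omega
    simp [generate_trolls, h1, h2, pvSpec]
  · obtain ⟨m, hm⟩ : ∃ m : Nat, n = (m : Int) := ⟨n.toNat, by omega⟩
    subst hm
    simp only [generate_trolls]
    rw [show (3 : Int) * (m : Int) = ((3 * m : Nat) : Int) by push_cast; ring]
    simp only [Int.toNat_natCast]
    have h := pv_foldA1 (3 * m) []
    simp only [List.append_nil] at h
    rw [h]
    have h2 := pv_foldA2 m ((List.range (3 * m)).map pvF) m 0 [] rfl (by omega)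
    simp only [Nat.cast_zero, List.nil_append, Nat.zero_add] at h2
    rw [h2]
    simp [pvSpec]

lemma pvR_natCast (i : Nat) : pvR (i : Int) = pvF i := by
  simp [pvR, pvF, pvPw]

lemma pv_B_eq_spec (n : Int) : generate_trolls_alt n = pvSpec n.toNat := by
  unfold generate_trolls_alt pvSpec
  rw [PySem.List.pyRange_one]
  rw [List.map_map]
  simp only [Int.sub_zero]
  apply List.map_congr_left
  intro k _
  simp only [Function.comp_apply, Int.zero_add]
  rw [show (3 * (k : Int)) = ((3 * k : Nat) : Int) by push_cast; ring]
  rw [show (((3 * k : Nat) : Int) + 1) = ((3 * k + 1 : Nat) : Int) by push_cast; ring]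
  rw [show (((3 * k : Nat) : Int) + 2) = ((3 * k + 2 : Nat) : Int) by push_cast; ring]
  rw [pvR_natCast, pvR_natCast, pvR_natCast]
  rfl

-- ===== VERDICT (by name: the statement is the Claim_ definition above) =====
theorem generate_trolls_spec : Claim_equal_generate_trolls := by
  intro n _
  unfold Spec_generate_trolls
  rw [pv_A_eq_spec, pv_B_eq_spec]
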